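-- pv_equiv track=rewrite | github.com/Mathematicator/SecuriSite | src/securisite/agents/regulation_agent.py | _schedule_inspection
-- ===== SOURCE A (Python) =====
-- from typing import Dict, Any, List
--
-- def _schedule_inspection(regulatory_analysis: List[Dict[str, Any]]) -> str:
--     """Schedule next inspection based on violations"""
--     if not regulatory_analysis:
--         return "Inspection sans préavis"
--
--     urgent_violations = [r for r in regulatory_analysis if r['severity'] == 'URGENTE']
--     high_violations = [r for r in regulatory_analysis if r['severity'] == 'HAUTE']
--
--     if urgent_violations:
--         return "Inspection urgente dans 24h"
--     elif high_violations:
--         return "Inspection dans 48h"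
--     else:
--         return "Inspection programmée dans 1 semaine"
-- ===== SOURCE B (Python) =====
-- RANK = {'URGENTE': 2, 'HAUTE': 1}
--
-- _SCHEDULE = {
--     -1: "Inspection sans préavis",
--     2: "Inspection urgente dans 24h",
--     1: "Inspection dans 48h",
--     0: "Inspection programmée dans 1 semaine",
-- }
--
--
-- def _schedule_inspection(regulatory_analysis):
--     """Schedule next inspection based on violations"""
--     best = -1
--     for r in regulatory_analysis:
--         best = max(best, RANK.get(r['severity'], 0))
--     return _SCHEDULE[best]
-- ===== Notes on version B (the rewrite author's own statement) =====
-- stated objective: simpler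
-- what changed: Replaces the two list-comprehension filter passes and if/elif chain with a single max-severity-rank accumulation over one pass plus a flat table dispatch on that rank (-1 encodes the empty list).
import Mathlib
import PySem

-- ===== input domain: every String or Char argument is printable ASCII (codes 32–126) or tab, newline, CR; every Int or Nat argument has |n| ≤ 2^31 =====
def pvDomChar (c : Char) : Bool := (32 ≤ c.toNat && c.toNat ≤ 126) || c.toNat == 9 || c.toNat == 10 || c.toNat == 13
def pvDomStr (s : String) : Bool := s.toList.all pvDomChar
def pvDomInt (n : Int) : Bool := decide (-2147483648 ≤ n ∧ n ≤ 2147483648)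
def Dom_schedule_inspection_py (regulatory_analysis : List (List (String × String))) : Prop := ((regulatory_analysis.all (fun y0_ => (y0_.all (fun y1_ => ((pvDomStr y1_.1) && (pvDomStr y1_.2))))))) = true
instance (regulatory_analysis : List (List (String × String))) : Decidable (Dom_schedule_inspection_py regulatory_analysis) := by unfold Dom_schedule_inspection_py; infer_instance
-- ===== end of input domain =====

-- B replaces A's two filter passes + if/elif with one max-rank pass and a flat dispatch (simpler).

-- ===== PORT A =====
-- r['severity']: first-match lookup; the "" default is never used inside Pre_ (key present).
def pvSev (r : List (String × String)) : String :=
  ((r.find? (fun p => p.1 = "severity")).map (·.2)).getD ""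

def schedule_inspection_py (regulatory_analysis : List (List (String × String))) : String :=
  if regulatory_analysis = [] then "Inspection sans préavis"
  else
    let urgent_violations := regulatory_analysis.filter (fun r => pvSev r = "URGENTE")
    let high_violations := regulatory_analysis.filter (fun r => pvSev r = "HAUTE")
    if urgent_violations ≠ [] then "Inspection urgente dans 24h"
    else if high_violations ≠ [] then "Inspection dans 48h"
    else "Inspection programmée dans 1 semaine"

-- ===== PORT B =====
-- RANK.get(s, 0)
def pvRank (s : String) : Int :=
  if s = "URGENTE" then 2 else if s = "HAUTE" then 1 else 0

def schedule_inspection_py_alt (regulatory_analysis : List (List (String × String))) : String :=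
  let best := regulatory_analysis.foldl (fun b r => max b (pvRank (pvSev r))) (-1)
  if best = -1 then "Inspection sans préavis"
  else if best = 2 then "Inspection urgente dans 24h"
  else if best = 1 then "Inspection dans 48h"
  else "Inspection programmée dans 1 semaine"

-- ===== PRECONDITION & SPEC =====
-- Pre_ excludes rows without a 'severity' key: there Python A (and B) raises KeyError.
def Pre_schedule_inspection_py (regulatory_analysis : List (List (String × String))) : Prop :=
  (regulatory_analysis.all (fun r => (r.find? (fun p => p.1 = "severity")).isSome)) = true
instance (regulatory_analysis : List (List (String × String))) : Decidable (Pre_schedule_inspection_py regulatory_analysis) := by unfold Pre_schedule_inspection_py; infer_instance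
def pvWitness_schedule_inspection_py : (List (List (String × String))) := [[("severity", "HAUTE")]]

def Spec_schedule_inspection_py (regulatory_analysis : List (List (String × String))) (out : String) : Prop := out = schedule_inspection_py_alt regulatory_analysis
instance (regulatory_analysis : List (List (String × String))) (out : String) : Decidable (Spec_schedule_inspection_py regulatory_analysis out) := by unfold Spec_schedule_inspection_py; infer_instance

-- ===== CLAIM (what is proved, stated in full; the proofs are below) =====
def Claim_equal_schedule_inspection_py : Prop := ∀ (regulatory_analysis : List (List (String × String))), Dom_schedule_inspection_py regulatory_analysis → Pre_schedule_inspection_py regulatory_analysis → Spec_schedule_inspection_py regulatory_analysis (schedule_inspection_py regulatory_analysis)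

-- ===== LEMMAS AND PROOFS =====

def pvStep (b : Int) (r : List (String × String)) : Int := max b (pvRank (pvSev r))

def pvM : List (List (String × String)) → Int
  | [] => -1
  | r :: l => max (pvRank (pvSev r)) (pvM l)

lemma pvFoldl_shift (l : List (List (String × String))) (a b : Int) :
    l.foldl pvStep (max a b) = max a (l.foldl pvStep b) := by
  induction l generalizing a b with
  | nil => simp
  | cons r l ih =>
      simp only [List.foldl_cons, pvStep, max_assoc]
      exact ih a (max b (pvRank (pvSev r)))

lemma pvFoldl_eq_pvM (l : List (List (String × String))) :
    l.foldl pvStep (-1) = pvM l := by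
  induction l with
  | nil => rfl
  | cons r l ih =>
      have h : max (-1 : Int) (pvRank (pvSev r)) = max (pvRank (pvSev r)) (-1) := max_comm _ _
      simp only [List.foldl_cons, pvStep, h, pvFoldl_shift, ih, pvM]

lemma pvRank_nonneg (s : String) : 0 ≤ pvRank s := by
  unfold pvRank; split_ifs <;> omega

lemma pvRank_le_two (s : String) : pvRank s ≤ 2 := by
  unfold pvRank; split_ifs <;> omega

lemma pvM_ge (l : List (List (String × String))) (r : List (String × String)) (h : r ∈ l) :
    pvRank (pvSev r) ≤ pvM l := by
  induction l with
  | nil => cases h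
  | cons x l ih =>
      rcases List.mem_cons.1 h with h | h
      · subst h; exact le_max_left _ _
      · exact le_trans (ih h) (le_max_right _ _)

lemma pvM_le (l : List (List (String × String))) (c : Int) (hc : -1 ≤ c)
    (h : ∀ r ∈ l, pvRank (pvSev r) ≤ c) : pvM l ≤ c := by
  induction l with
  | nil => exact hc
  | cons x l ih =>
      exact max_le (h x (List.mem_cons_self)) (ih (fun r hr => h r (List.mem_cons_of_mem _ hr)))

lemma pvM_eq_two (l : List (List (String × String))) (hU : ∃ r ∈ l, pvSev r = "URGENTE") :
    pvM l = 2 := by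
  rcases hU with ⟨r, hr, hs⟩
  have h1 : (2 : Int) ≤ pvM l := by
    have := pvM_ge l r hr
    simpa [pvRank, hs] using this
  have h2 : pvM l ≤ 2 := pvM_le l 2 (by omega) (fun r _ => pvRank_le_two _)
  omega

lemma pvM_eq_one (l : List (List (String × String))) (hU : ¬ ∃ r ∈ l, pvSev r = "URGENTE")
    (hH : ∃ r ∈ l, pvSev r = "HAUTE") : pvM l = 1 := by
  rcases hH with ⟨r, hr, hs⟩
  have h1 : (1 : Int) ≤ pvM l := by
    have := pvM_ge l r hr
    simpa [pvRank, hs] using this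
  have h2 : pvM l ≤ 1 := by
    refine pvM_le l 1 (by omega) (fun r hr => ?_)
    have hne : pvSev r ≠ "URGENTE" := fun he => hU ⟨r, hr, he⟩
    unfold pvRank
    rw [if_neg hne]
    split_ifs <;> omega
  omega

lemma pvM_eq_zero (l : List (List (String × String))) (hne : l ≠ [])
    (hU : ¬ ∃ r ∈ l, pvSev r = "URGENTE") (hH : ¬ ∃ r ∈ l, pvSev r = "HAUTE") :
    pvM l = 0 := by
  rcases List.exists_mem_of_ne_nil l hne with ⟨x, hx⟩
  have h1 : (0 : Int) ≤ pvM l := le_trans (pvRank_nonneg _) (pvM_ge l x hx)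
  have h2 : pvM l ≤ 0 := by
    refine pvM_le l 0 (by omega) (fun r hr => ?_)
    have h1' : pvSev r ≠ "URGENTE" := fun he => hU ⟨r, hr, he⟩
    have h2' : pvSev r ≠ "HAUTE" := fun he => hH ⟨r, hr, he⟩
    unfold pvRank
    rw [if_neg h1', if_neg h2']
  omega

-- ===== VERDICT (by name: the statement is the Claim_ definition above) =====
theorem schedule_inspection_py_spec : Claim_equal_schedule_inspection_py := by
  intro l _ _
  unfold Spec_schedule_inspection_py schedule_inspection_py schedule_inspection_py_alt
  have hfold : l.foldl (fun b r => max b (pvRank (pvSev r))) (-1) = pvM l := pvFoldl_eq_pvM l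
  rw [hfold]
  by_cases hnil : l = []
  · subst hnil; simp [pvM]
  · simp only [hnil, if_false]
    by_cases hU : ∃ r ∈ l, pvSev r = "URGENTE"
    · have hm := pvM_eq_two l hU
      have hf : l.filter (fun r => pvSev r = "URGENTE") ≠ [] := by
        rcases hU with ⟨r, hr, hs⟩
        exact List.ne_nil_of_mem (List.mem_filter.2 ⟨hr, by simp [hs]⟩)
      simp [hf, hm]
    · have hf : l.filter (fun r => pvSev r = "URGENTE") = [] := by
        rw [List.filter_eq_nil_iff]
        intro r hr
        simpa using fun he => hU ⟨r, hr, he⟩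
      by_cases hH : ∃ r ∈ l, pvSev r = "HAUTE"
      · have hm := pvM_eq_one l hU hH
        have hf2 : l.filter (fun r => pvSev r = "HAUTE") ≠ [] := by
          rcases hH with ⟨r, hr, hs⟩
          exact List.ne_nil_of_mem (List.mem_filter.2 ⟨hr, by simp [hs]⟩)
        simp [hf, hf2, hm]
      · have hm := pvM_eq_zero l hnil hU hH
        have hf2 : l.filter (fun r => pvSev r = "HAUTE") = [] := by
          rw [List.filter_eq_nil_iff]
          intro r hr
          simpa using fun he => hH ⟨r, hr, he⟩
        simp [hf, hf2, hm]
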